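-- pv_equiv track=rewrite | github.com/borget/cracking-the-coding-interview | coding/arrays/make_array_zero.py | minimumOperations
-- ===== SOURCE A (Python) =====
-- from typing import List
--
-- def minimumOperations(nums: List[int]) -> int:
--     if len(nums) == 1 and nums[0] == 0:
--         return 0
--
--     count = 0
--
--     sorted_nums = sorted([num for num in nums if num != 0])
--
--     copied = sorted_nums.copy()
--
--     for i in range(len(copied)):
--         min_num = copied[i]
--         copied = [new_num - min_num for new_num in copied]
--         if min_num != 0:
--             count += 1
--
--     return count
-- ===== SOURCE B (Python) =====
-- from typing import List
--
-- def minimumOperations(nums: List[int]) -> int: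
--     # sort the nonzero values once, then count distinct values in one adjacency scan
--     count = 0
--     prev = None
--     for x in sorted(v for v in nums if v != 0):
--         if x != prev:
--             count += 1
--             prev = x
--     return count
-- ===== Notes on version B (the rewrite author's own statement) =====
-- stated objective: faster
-- what changed: Replaced A's loop that rebuilds the whole array by subtracting the current minimum on every iteration with a single adjacency scan over the sorted nonzero values that counts value changes.
import Mathlib
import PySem

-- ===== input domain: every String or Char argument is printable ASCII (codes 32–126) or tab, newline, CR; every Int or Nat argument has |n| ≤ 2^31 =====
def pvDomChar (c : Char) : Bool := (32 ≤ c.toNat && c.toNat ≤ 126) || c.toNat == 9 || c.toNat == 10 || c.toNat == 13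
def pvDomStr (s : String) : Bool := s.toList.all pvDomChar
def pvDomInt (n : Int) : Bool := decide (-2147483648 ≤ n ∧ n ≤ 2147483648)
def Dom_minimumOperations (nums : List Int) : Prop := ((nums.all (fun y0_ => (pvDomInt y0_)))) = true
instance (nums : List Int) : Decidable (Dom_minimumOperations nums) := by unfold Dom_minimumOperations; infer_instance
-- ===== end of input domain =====

-- B replaces A's repeated whole-array subtraction passes with one adjacency scan over the
-- sorted nonzero values (objective: a faster, O(n log n) instead of O(n^2), algorithm).

-- ===== PORT A =====
-- loop body: min_num = copied[i]; copied = [x - min_num for x in copied]; count += (min_num != 0)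
-- copied[i] is always in range here, so the total pyGetD form is exact.
def aStep (st : List Int × Int) (i : Int) : List Int × Int :=
  let m := PySem.List.pyGetD st.1 i 0
  (st.1.map (fun x => x - m), st.2 + if m ≠ 0 then 1 else 0)

def minimumOperations (nums : List Int) : Int :=
  if nums.length = 1 ∧ PySem.List.pyGetD nums 0 0 = 0 then 0
  else
    let sorted_nums := PySem.List.sorted (nums.filter (fun num => decide (num ≠ 0))) (fun x => x) false
    ((PySem.List.pyRange 0 (sorted_nums.length : Int) 1).foldl aStep (sorted_nums, 0)).2

-- ===== PORT B =====
-- loop body: if x != prev: count += 1; prev = x   (prev starts as None)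
def bStep (st : Int × Option Int) (x : Int) : Int × Option Int :=
  if some x ≠ st.2 then (st.1 + 1, some x) else st

def minimumOperations_alt (nums : List Int) : Int :=
  ((PySem.List.sorted (nums.filter (fun v => decide (v ≠ 0))) (fun x => x) false).foldl bStep (0, none)).1

-- ===== PRECONDITION & SPEC =====
def Spec_minimumOperations (nums : List Int) (out : Int) : Prop := out = minimumOperations_alt nums
instance (nums : List Int) (out : Int) : Decidable (Spec_minimumOperations nums out) := by unfold Spec_minimumOperations; infer_instance

-- ===== CLAIM (what is proved, stated in full; the proofs are below) =====
def Claim_equal_minimumOperations : Prop := ∀ (nums : List Int), Dom_minimumOperations nums → Spec_minimumOperations nums (minimumOperations nums)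

-- ===== LEMMAS AND PROOFS =====

-- A's index loop from position k, on state s.map (· - c), counts exactly what B's adjacency
-- scan counts on the suffix s.drop k with previous value c.
theorem aLoop_eq_bScan (s : List Int) (k : Nat) (hk : k ≤ s.length) (c cnt : Int) :
    ((PySem.List.pyRange (k : Int) (s.length : Int) 1).foldl aStep (s.map (fun x => x - c), cnt)).2
      = ((s.drop k).foldl bStep (cnt, some c)).1 := by
  induction hn : s.length - k generalizing k c cnt with
  | zero =>
    have hk' : k = s.length := by omega
    subst hk'
    rw [PySem.List.pyRange_one_eq_nil (by exact le_refl _), List.drop_length]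
    simp [List.foldl]
  | succ n ih =>
    have hlt : k < s.length := by omega
    rw [PySem.List.pyRange_one_cons (by exact_mod_cast hlt)]
    have hdrop : s.drop k = s[k] :: s.drop (k + 1) := List.drop_eq_getElem_cons hlt
    rw [hdrop]
    simp only [List.foldl_cons]
    have hget : PySem.List.pyGetD (s.map (fun x => x - c)) (k : Int) 0 = s[k] - c := by
      rw [PySem.List.pyGetD_natCast]
      rw [List.getD_eq_getElem _ _ (by simpa using hlt)]
      simp
    have hmap : (s.map (fun x => x - c)).map (fun x => x - (s[k] - c)) = s.map (fun x => x - s[k]) := by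
      rw [List.map_map]
      exact List.map_congr_left (fun x _ => by simp [Function.comp])
    have hstep : aStep (s.map (fun x => x - c), cnt) (k : Int)
        = (s.map (fun x => x - s[k]), cnt + if s[k] - c ≠ 0 then 1 else 0) := by
      simp only [aStep, hget, hmap]
    rw [hstep]
    have hcast : ((k : Int) + 1) = ((k + 1 : Nat) : Int) := by push_cast; ring
    rw [hcast, ih (k + 1) (by omega) s[k] _ (by omega)]
    have hb : bStep (cnt, some c) s[k] = (cnt + if s[k] - c ≠ 0 then 1 else 0, some s[k]) := by
      by_cases h : s[k] = c
      · subst h; simp [bStep]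
      · simp [bStep, h, sub_eq_zero]
    rw [hb]

-- ===== VERDICT (by name: the statement is the Claim_ definition above) =====
theorem minimumOperations_spec : Claim_equal_minimumOperations := by
  intro nums _
  show minimumOperations nums = minimumOperations_alt nums
  unfold minimumOperations minimumOperations_alt
  set s := PySem.List.sorted (nums.filter (fun num => decide (num ≠ 0))) (fun x => x) false with hs
  have hnz : ∀ x ∈ s, x ≠ 0 := by
    intro x hx
    have := (PySem.List.mem_sorted _ _ _ _).1 (hs ▸ hx)
    simpa using (List.mem_filter.1 this).2
  by_cases hspecial : nums.length = 1 ∧ PySem.List.pyGetD nums 0 0 = 0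
  · -- nums = [0]: the filtered list is empty, B returns 0 too.
    rw [if_pos hspecial]
    obtain ⟨hlen, hval⟩ := hspecial
    obtain ⟨a, rfl⟩ : ∃ a, nums = [a] := by
      match nums, hlen with
      | [a], _ => exact ⟨a, rfl⟩
    have ha : a = 0 := by simpa [PySem.List.pyGetD_zero_cons] using hval
    subst ha
    simp [hs, PySem.List.sorted]
  · rw [if_neg hspecial]
    have h0 : s.map (fun x => x - (0 : Int)) = s := by simp
    have := aLoop_eq_bScan s 0 (Nat.zero_le _) 0 0
    rw [h0] at this
    rw [show ((0 : Nat) : Int) = 0 from rfl] at this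
    rw [this, List.drop_zero]
    -- the two initial states (0, some 0) and (0, none) agree on the first step since s has no zeros
    cases hsc : s with
    | nil => simp [List.foldl]
    | cons x t =>
      have hx : x ≠ 0 := hnz x (by simp [hsc])
      simp only [List.foldl_cons]
      have h1 : bStep (0, some 0) x = (1, some x) := by simp [bStep, hx]
      have h2 : bStep (0, none) x = (1, some x) := by simp [bStep]
      rw [h1, h2]
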